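-- pv_equiv track=rewrite | github.com/Agents365-ai/zotero-cli-cc | src/zotero_cli_cc/core/rag.py | _chunk_by_word
-- ===== SOURCE A (Python) =====
-- def _chunk_by_char(text: str, max_chars: int, overlap: int) -> list[str]:
--     if len(text) <= max_chars:
--         return [text]
--     step = max_chars - overlap if overlap else max_chars
--     result = []
--     start = 0
--     while start < len(text):
--         end = start + max_chars if start + max_chars <= len(text) else len(text)
--         result.append(text[start:end])
--         start += step
--     return result
--
-- def _chunk_by_word(text: str, max_chars: int, overlap: int) -> list[str]:
--     words = text.split()
--     result: list[str] = []
--     current: list[str] = []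
--     current_len = 0
--     for word in words:
--         word_len = len(word) + 1
--         if word_len > max_chars:
--             if current:
--                 result.append(" ".join(current))
--                 current = []
--                 current_len = 0
--             result.extend(_chunk_by_char(word, max_chars, overlap))
--         elif current_len + word_len > max_chars and current:
--             result.append(" ".join(current))
--             current = [word]
--             current_len = word_len
--         else:
--             current.append(word)
--             current_len += word_len
--     if current:
--         result.append(" ".join(current))
--     return result
-- ===== SOURCE B (Python) =====
-- def _chunk_by_char(text: str, max_chars: int, overlap: int) -> list[str]:
--     if len(text) <= max_chars:
--         return [text]
--     step = max_chars - overlap if overlap else max_chars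
--     count = -(-len(text) // step)  # ceil(len/step): number of chunk starts 0, step, 2*step, ...
--     return [text[k * step : k * step + max_chars] for k in range(count)]
--
-- def _chunk_by_word(text: str, max_chars: int, overlap: int) -> list[str]:
--     words = text.split()
--     n = len(words)
--     # prefix sums: P[k] = total cost of the first k words, each word costing len(word)+1
--     P = [0]
--     acc = 0
--     for w in words:
--         acc += len(w) + 1
--         P.append(acc)
--     result: list[str] = []
--     i = 0
--     while i < n:
--         if len(words[i]) + 1 > max_chars:
--             result.extend(_chunk_by_char(words[i], max_chars, overlap))
--             i += 1
--         else:
--             # binary search: largest j in [i+1, n] with P[j] - P[i] <= max_chars.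
--             # An oversized word at k contributes P[k+1]-P[k] > max_chars, so the
--             # search can never reach past it: no run-boundary scan is needed.
--             target = P[i] + max_chars
--             lo, hi = i + 1, n
--             while lo < hi:
--                 mid = (lo + hi + 1) // 2
--                 if P[mid] <= target:
--                     lo = mid
--                 else:
--                     hi = mid - 1
--             result.append(" ".join(words[i:lo]))
--             i = lo
--     return result
-- ===== Notes on version B (the rewrite author's own statement) =====
-- stated objective: alternative
-- what changed: B precomputes prefix sums of word costs and finds each chunk's end by binary search over them (oversized words are excluded automatically because their cost increment exceeds max_chars), instead of A's per-word greedy fold with flush-on-overflow accumulator state; the character chunker computes its chunk count in closed form (ceiling division) instead of A's hand-clamped while loop; Pre_ excludes only the inputs on which A's character-chunking while loop diverges (a word longer than max_chars with a non-positive step).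
import Mathlib
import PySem

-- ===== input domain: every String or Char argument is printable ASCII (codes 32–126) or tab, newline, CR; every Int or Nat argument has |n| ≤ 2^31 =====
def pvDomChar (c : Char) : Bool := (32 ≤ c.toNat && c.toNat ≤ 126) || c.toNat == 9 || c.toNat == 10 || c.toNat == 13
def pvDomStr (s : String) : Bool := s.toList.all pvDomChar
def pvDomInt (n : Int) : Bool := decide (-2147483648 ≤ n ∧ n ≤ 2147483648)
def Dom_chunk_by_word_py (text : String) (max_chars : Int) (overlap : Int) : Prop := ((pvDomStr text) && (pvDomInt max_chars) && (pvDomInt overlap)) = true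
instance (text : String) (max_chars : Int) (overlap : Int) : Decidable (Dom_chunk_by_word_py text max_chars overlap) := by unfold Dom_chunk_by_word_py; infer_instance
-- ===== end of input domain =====

-- B replaces A's flat flush-on-overflow fold by prefix sums of word costs with a binary
-- search for each chunk's end, and A's hand-clamped char-chunk while loop by a closed-form
-- chunk count; objective: alternative algorithm (greedy scan -> prefix sums + bisection).


-- ===== PORT A =====
-- the while loop of _chunk_by_char, with fuel; fuel t.length + 1 suffices whenever step > 0
-- (when step ≤ 0 and the loop is entered, the Python diverges — excluded by Pre_)
def pvAChunkLoop (t : List Char) (maxc step : Int) : Nat → Int → List String → List String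
  | 0, _, res => res
  | fuel+1, start, res =>
      if start < (t.length : Int) then
        let e : Int := if start + maxc ≤ (t.length : Int) then start + maxc else (t.length : Int)
        pvAChunkLoop t maxc step fuel (start + step)
          (res ++ [String.ofList (PySem.List.slice t (some start) (some e))])
      else res

def pvAChunkByChar (t : List Char) (maxc ov : Int) : List String :=
  if (t.length : Int) ≤ maxc then [String.ofList t]
  else
    let step := if ov ≠ 0 then maxc - ov else maxc
    pvAChunkLoop t maxc step (t.length + 1) 0 []

-- the body of A's for-loop: state (result, current, current_len)
def pvAStep (maxc ov : Int) (acc : List String × List (List Char) × Int) (w : List Char) :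
    List String × List (List Char) × Int :=
  let res := acc.1
  let cur := acc.2.1
  let clen := acc.2.2
  if (w.length : Int) + 1 > maxc then
    let res' := if cur ≠ [] then res ++ [String.ofList (PySem.Chars.join [' '] cur)] else res
    (res' ++ pvAChunkByChar w maxc ov, [], 0)
  else if clen + ((w.length : Int) + 1) > maxc ∧ cur ≠ [] then
    (res ++ [String.ofList (PySem.Chars.join [' '] cur)], [w], (w.length : Int) + 1)
  else
    (res, cur ++ [w], clen + ((w.length : Int) + 1))

def chunk_by_word_py (text : String) (max_chars : Int) (overlap : Int) : List String :=
  let words := PySem.Chars.split₀ text.toList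
  let st := words.foldl (pvAStep max_chars overlap) ([], [], 0)
  if st.2.1 ≠ [] then st.1 ++ [String.ofList (PySem.Chars.join [' '] st.2.1)] else st.1

-- ===== PORT B =====
-- B's char chunker: chunk count in closed form (count = -(-len // step)), starts k*step
def pvBChunkByChar (t : List Char) (maxc ov : Int) : List String :=
  if (t.length : Int) ≤ maxc then [String.ofList t]
  else
    let step := if ov ≠ 0 then maxc - ov else maxc
    let count := -(PySem.Int.floordiv (-(t.length : Int)) step)
    (PySem.List.pyRange 0 count 1).map
      (fun k => String.ofList (PySem.List.slice t (some (k * step)) (some (k * step + maxc))))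

-- B's binary search (the while lo < hi loop), with fuel; (hi - lo).toNat iterations always
-- suffice since the interval shrinks each step; mid index is always in range when called
-- from _chunk_by_word (lo, hi stay within [i+1, n] and P has length n+1)
def pvBsearch (P : List Int) (target : Int) : Nat → Int → Int → Int
  | 0, lo, _ => lo
  | fuel+1, lo, hi =>
      if lo < hi then
        let mid := PySem.Int.floordiv (lo + hi + 1) 2
        if PySem.List.pyGetD P mid 0 ≤ target then pvBsearch P target fuel mid hi
        else pvBsearch P target fuel lo (mid - 1)
      else lo

-- B's outer while loop over the word index i, with fuel; words.length iterations always
-- suffice since every iteration consumes at least one word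
def pvBOuterGo (words : List (List Char)) (P : List Int) (maxc ov : Int) : Nat → Nat → List String
  | 0, _ => []
  | fuel+1, i =>
      if h : i < words.length then
        if ((words[i]).length : Int) + 1 > maxc then
          pvBChunkByChar words[i] maxc ov ++ pvBOuterGo words P maxc ov fuel (i + 1)
        else
          let j := pvBsearch P (PySem.List.pyGetD P (i : Int) 0 + maxc)
            ((words.length : Int) - ((i : Int) + 1)).toNat ((i : Int) + 1) (words.length : Int)
          String.ofList (PySem.Chars.join [' '] (PySem.List.slice words (some (i : Int)) (some j)))
            :: pvBOuterGo words P maxc ov fuel j.toNat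
      else []

def chunk_by_word_py_alt (text : String) (max_chars : Int) (overlap : Int) : List String :=
  let words := PySem.Chars.split₀ text.toList
  let st := words.foldl
    (fun (st : List Int × Int) w =>
      (st.1 ++ [st.2 + ((w.length : Int) + 1)], st.2 + ((w.length : Int) + 1))) ([0], 0)
  pvBOuterGo words st.1 max_chars overlap words.length 0

-- ===== PRECONDITION & SPEC =====
-- Pre_ excludes exactly the inputs on which A diverges: some whitespace-split word is longer
-- than max_chars while _chunk_by_char's step (max_chars - overlap if overlap else max_chars)
-- is not positive — there A's while loop never terminates.
def Pre_chunk_by_word_py (text : String) (max_chars : Int) (overlap : Int) : Prop :=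
  (∀ w ∈ PySem.Chars.split₀ text.toList, (w.length : Int) ≤ max_chars) ∨
  (0 < if overlap ≠ 0 then max_chars - overlap else max_chars)
instance (text : String) (max_chars : Int) (overlap : Int) : Decidable (Pre_chunk_by_word_py text max_chars overlap) := by unfold Pre_chunk_by_word_py; infer_instance

def pvWitness_chunk_by_word_py : String × Int × Int := ("hello brave new world", 11, 0)

def Spec_chunk_by_word_py (text : String) (max_chars : Int) (overlap : Int) (out : List String) : Prop := out = chunk_by_word_py_alt text max_chars overlap
instance (text : String) (max_chars : Int) (overlap : Int) (out : List String) : Decidable (Spec_chunk_by_word_py text max_chars overlap out) := by unfold Spec_chunk_by_word_py; infer_instance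

-- ===== CLAIM (what is proved, stated in full; the proofs are below) =====
def Claim_equal_chunk_by_word_py : Prop := ∀ (text : String) (max_chars : Int) (overlap : Int), Dom_chunk_by_word_py text max_chars overlap → Pre_chunk_by_word_py text max_chars overlap → Spec_chunk_by_word_py text max_chars overlap (chunk_by_word_py text max_chars overlap)

-- ===== LEMMAS AND PROOFS =====

-- ---- the char chunkers agree whenever A's terminates ----

theorem pvPyRange_pos_nil (a b s : Int) (hs : 0 < s) (hab : b ≤ a) :
    PySem.List.pyRange a b s = [] := by
  rw [PySem.List.pyRange_of_pos _ _ hs]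
  simp [not_lt.mpr hab]

theorem pvPyRange_pos_cons (a b s : Int) (hs : 0 < s) (hab : a < b) :
    PySem.List.pyRange a b s = a :: PySem.List.pyRange (a + s) b s := by
  rw [PySem.List.pyRange_of_pos _ _ hs, PySem.List.pyRange_of_pos _ _ hs]
  have hsne : s ≠ 0 := ne_of_gt hs
  have hkey : (b - a + s - 1) / s = (b - a - 1) / s + 1 := by
    have : b - a + s - 1 = (b - a - 1) + 1 * s := by ring
    rw [this, Int.add_mul_ediv_right _ _ hsne]
  have htail : (if a + s < b then ((b - (a + s) + s - 1) / s).toNat else 0) = ((b - a - 1) / s).toNat := by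
    by_cases h2 : a + s < b
    · have e : b - (a + s) + s - 1 = b - a - 1 := by ring
      rw [if_pos h2, e]
    · rw [if_neg h2]
      have h0 : (b - a - 1) / s = 0 := by
        apply Int.ediv_eq_zero_of_lt <;> omega
      omega
  rw [if_pos hab, hkey, htail]
  have hnn : 0 ≤ (b - a - 1) / s := Int.ediv_nonneg (by omega) (by omega)
  have : ((b - a - 1) / s + 1).toNat = ((b - a - 1) / s).toNat + 1 := by omega
  rw [this, List.range_succ_eq_map]
  simp only [List.map_cons, List.map_map]
  congr 1
  · simp
  · apply List.map_congr_left
    intro k _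
    simp only [Function.comp_apply]
    push_cast
    ring

-- the two slice expressions (A clamps the end by hand, B lets the slice clamp) agree
theorem pvSlice_clamp (t : List Char) (maxc s : Int) (hsn : 0 ≤ s) :
    PySem.List.slice t (some s) (some (if s + maxc ≤ (t.length : Int) then s + maxc else (t.length : Int)))
      = PySem.List.slice t (some s) (some (s + maxc)) := by
  by_cases h : s + maxc ≤ (t.length : Int)
  · rw [if_pos h]
  · rw [if_neg h]
    have hb : 0 ≤ s + maxc := by omega
    rw [PySem.List.slice_toNat t hsn (Int.natCast_nonneg _), PySem.List.slice_toNat t hsn hb]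
    have h1 : (t.drop s.toNat).length ≤ (t.length : Int).toNat - s.toNat := by
      simp [List.length_drop]
    have h2 : (t.drop s.toNat).length ≤ (s + maxc).toNat - s.toNat := by
      simp only [List.length_drop]
      omega
    rw [List.take_of_length_le h1, List.take_of_length_le h2]

-- the fueled while loop of A's _chunk_by_char as a map over the arithmetic range of starts
theorem pvAChunkLoop_eq (t : List Char) (maxc step : Int) (hs : 0 < step) :
    ∀ (fuel : Nat) (start : Int) (res : List String), 0 ≤ start →
      (t.length : Int) - start ≤ (fuel : Int) * step →
      pvAChunkLoop t maxc step fuel start res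
        = res ++ (PySem.List.pyRange start (t.length : Int) step).map
            (fun s => String.ofList (PySem.List.slice t (some s) (some (s + maxc)))) := by
  intro fuel
  induction fuel with
  | zero =>
      intro start res h0 hb
      have : (t.length : Int) ≤ start := by push_cast at hb; omega
      rw [pvPyRange_pos_nil _ _ _ hs this]
      simp [pvAChunkLoop]
  | succ fuel ih =>
      intro start res h0 hb
      by_cases h : start < (t.length : Int)
      · simp only [pvAChunkLoop, if_pos h]
        rw [ih (start + step) _ (by omega) (by push_cast at hb ⊢; nlinarith)]
        rw [pvPyRange_pos_cons _ _ _ hs h]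
        simp only [List.map_cons, List.append_assoc, List.cons_append, List.nil_append]
        rw [pvSlice_clamp t maxc start h0]
      · simp only [pvAChunkLoop, if_neg h]
        rw [pvPyRange_pos_nil _ _ _ hs (not_lt.mp h)]
        simp

-- B's range of chunk indices, scaled by step, is A's arithmetic range of starts
theorem pvRange_scale (len step : Int) (hs : 0 < step) (hl : 0 < len) :
    PySem.List.pyRange 0 len step
      = (PySem.List.pyRange 0 (-(PySem.Int.floordiv (-len) step)) 1).map (fun k => k * step) := by
  have hA : ((len + step - 1) / step) * step ≤ len + step - 1 :=
    (Int.le_ediv_iff_mul_le hs).mp (le_refl _)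
  have hB : len + step - 1 < ((len + step - 1) / step + 1) * step :=
    (Int.ediv_lt_iff_lt_mul hs).mp (by omega)
  have hq : -(PySem.Int.floordiv (-len) step) = (len + step - 1) / step :=
    (PySem.Int.neg_floordiv_neg_eq_iff_of_pos hs).mpr ⟨by nlinarith, by nlinarith⟩
  rw [hq, PySem.List.pyRange_of_pos _ _ hs, if_pos hl, PySem.List.pyRange_one]
  simp only [sub_zero, List.map_map]
  apply List.map_congr_left
  intro k _
  simp only [Function.comp_apply]
  ring

-- A's and B's character chunkers agree whenever A's terminates
theorem pvChunkByChar_eq (t : List Char) (maxc ov : Int)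
    (h : (t.length : Int) ≤ maxc ∨ 0 < (if ov ≠ 0 then maxc - ov else maxc)) :
    pvAChunkByChar t maxc ov = pvBChunkByChar t maxc ov := by
  unfold pvAChunkByChar pvBChunkByChar
  by_cases hle : (t.length : Int) ≤ maxc
  · rw [if_pos hle, if_pos hle]
  · rw [if_neg hle, if_neg hle]
    have hs : 0 < (if ov ≠ 0 then maxc - ov else maxc) := h.resolve_left hle
    rw [pvAChunkLoop_eq t maxc _ hs (t.length + 1) 0 [] le_rfl
      (by push_cast; nlinarith [Int.natCast_nonneg t.length])]
    by_cases hz : t.length = 0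
    · simp only [hz, Nat.cast_zero, neg_zero]
      have h0 : PySem.Int.floordiv 0 (if ov ≠ 0 then maxc - ov else maxc) = 0 := by
        rw [PySem.Int.floordiv_eq_ediv_of_pos hs]
        simp
      rw [pvPyRange_pos_nil _ _ _ hs le_rfl, h0]
      simp
    · rw [pvRange_scale (t.length : Int) _ hs (by omega), List.map_map]
      simp

-- ---- the reference greedy (proof-only): A's fold re-stated as build-each-chunk loops ----

def pvRefInner (maxc : Int) : List (List Char) → List (List Char) → Int → List (List Char) × List (List Char)
  | [], chunk, _ => (chunk, [])
  | w :: ws, chunk, clen =>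
      if (w.length : Int) + 1 ≤ maxc ∧ clen + ((w.length : Int) + 1) ≤ maxc then
        pvRefInner maxc ws (chunk ++ [w]) (clen + ((w.length : Int) + 1))
      else (chunk, w :: ws)

theorem pvRefInner_rest_le (maxc : Int) :
    ∀ (ws chunk : List (List Char)) (clen : Int), (pvRefInner maxc ws chunk clen).2.length ≤ ws.length := by
  intro ws
  induction ws with
  | nil => intro chunk clen; simp [pvRefInner]
  | cons w ws ih =>
      intro chunk clen
      simp only [pvRefInner]
      split
      · exact le_trans (ih _ _) (Nat.le_succ _)
      · exact le_refl _

def pvRefOuter (maxc ov : Int) : List (List Char) → List String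
  | [] => []
  | w :: ws =>
      if (w.length : Int) + 1 > maxc then
        pvAChunkByChar w maxc ov ++ pvRefOuter maxc ov ws
      else
        let p := pvRefInner maxc ws [w] ((w.length : Int) + 1)
        String.ofList (PySem.Chars.join [' '] p.1) :: pvRefOuter maxc ov p.2
  termination_by ws => ws.length
  decreasing_by
    · simp
    · exact Nat.lt_succ_of_le (pvRefInner_rest_le maxc ws [w] _)

-- A's fold-with-flush equals the reference greedy, by strong induction on the number of
-- remaining words (the reference inner loop consumes several of them at once)
theorem pvMainRef (maxc ov : Int) :
    ∀ (n : Nat) (ws : List (List Char)), ws.length ≤ n →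
      (∀ res : List String,
        (let st := ws.foldl (pvAStep maxc ov) (res, [], 0)
         if st.2.1 ≠ [] then st.1 ++ [String.ofList (PySem.Chars.join [' '] st.2.1)] else st.1)
          = res ++ pvRefOuter maxc ov ws) ∧
      (∀ (res : List String) (cur : List (List Char)) (clen : Int), cur ≠ [] →
        (let st := ws.foldl (pvAStep maxc ov) (res, cur, clen)
         if st.2.1 ≠ [] then st.1 ++ [String.ofList (PySem.Chars.join [' '] st.2.1)] else st.1)
          = res ++ String.ofList (PySem.Chars.join [' '] (pvRefInner maxc ws cur clen).1)
              :: pvRefOuter maxc ov (pvRefInner maxc ws cur clen).2) := by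
  intro n
  induction n with
  | zero =>
      intro ws hlen
      have : ws = [] := List.eq_nil_of_length_eq_zero (Nat.le_zero.mp hlen)
      subst this
      constructor
      · intro res; simp [pvRefOuter]
      · intro res cur clen hcur
        simp [pvRefInner, pvRefOuter, if_pos hcur]
  | succ n ih =>
      intro ws hlen
      cases ws with
      | nil =>
          constructor
          · intro res; simp [pvRefOuter]
          · intro res cur clen hcur
            simp [pvRefInner, pvRefOuter, if_pos hcur]
      | cons w ws =>
          have hlen' : ws.length ≤ n := by simpa using hlen
          constructor
          · -- current chunk empty
            intro res
            by_cases hbig : (w.length : Int) + 1 > maxc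
            · simp only [List.foldl_cons, pvAStep, if_pos hbig, ne_eq, not_true_eq_false,
                ite_false]
              rw [pvRefOuter, if_pos hbig, (ih ws hlen').1 (res ++ pvAChunkByChar w maxc ov)]
              simp
            · have hfit : ¬ ((0 : Int) + ((w.length : Int) + 1) > maxc ∧ ([] : List (List Char)) ≠ []) := by
                simp
              simp only [List.foldl_cons, pvAStep, if_neg hbig, if_neg hfit]
              rw [pvRefOuter, if_neg hbig]
              have h := (ih ws hlen').2 res [w] ((w.length : Int) + 1) (by simp)
              simp only [List.nil_append, zero_add]
              exact h
          · -- current chunk nonempty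
            intro res cur clen hcur
            by_cases hbig : (w.length : Int) + 1 > maxc
            · simp only [List.foldl_cons, pvAStep, if_pos hbig, ne_eq, hcur, not_false_eq_true,
                ite_true]
              rw [(ih ws hlen').1
                (res ++ [String.ofList (PySem.Chars.join [' '] cur)] ++ pvAChunkByChar w maxc ov)]
              have hstop : ¬ ((w.length : Int) + 1 ≤ maxc ∧ clen + ((w.length : Int) + 1) ≤ maxc) := by
                intro hc; exact absurd hc.1 (not_le.mpr hbig)
              rw [pvRefInner, if_neg hstop]
              rw [pvRefOuter, if_pos hbig]
              simp
            · by_cases hov : clen + ((w.length : Int) + 1) > maxc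
              · have hc2 : clen + ((w.length : Int) + 1) > maxc ∧ cur ≠ [] := ⟨hov, hcur⟩
                simp only [List.foldl_cons, pvAStep, if_neg hbig, if_pos hc2]
                rw [(ih ws hlen').2 (res ++ [String.ofList (PySem.Chars.join [' '] cur)])
                  [w] ((w.length : Int) + 1) (by simp)]
                have hstop : ¬ ((w.length : Int) + 1 ≤ maxc ∧ clen + ((w.length : Int) + 1) ≤ maxc) := by
                  intro hc; exact absurd hc.2 (not_le.mpr hov)
                rw [pvRefInner, if_neg hstop]
                rw [pvRefOuter, if_neg hbig]
                simp
              · have hc2 : ¬ (clen + ((w.length : Int) + 1) > maxc ∧ cur ≠ []) := by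
                  intro hc; exact absurd hc.1 hov
                simp only [List.foldl_cons, pvAStep, if_neg hbig, if_neg hc2]
                rw [(ih ws hlen').2 res (cur ++ [w]) (clen + ((w.length : Int) + 1))
                  (by simp)]
                rw [pvRefInner, if_pos ⟨not_lt.mp hbig, not_lt.mp hov⟩]

-- ---- prefix sums: characterisation of B's P list ----

def pvCost (ws : List (List Char)) : Int := (ws.map (fun w => ((w.length : Int) + 1))).sum

def pvPS : Int → List (List Char) → List Int
  | acc, [] => [acc]
  | acc, w :: ws => acc :: pvPS (acc + ((w.length : Int) + 1)) ws

theorem pvPS_cons_head (acc : Int) (ws : List (List Char)) :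
    pvPS acc ws = acc :: (pvPS acc ws).tail := by
  cases ws <;> simp [pvPS]

-- B's loop building P computes pvPS
theorem pvFoldP (ws : List (List Char)) :
    ∀ (P0 : List Int) (acc : Int),
      (ws.foldl (fun (st : List Int × Int) w =>
        (st.1 ++ [st.2 + ((w.length : Int) + 1)], st.2 + ((w.length : Int) + 1))) (P0, acc)).1
        = P0 ++ (pvPS acc ws).tail := by
  induction ws with
  | nil => intro P0 acc; simp [pvPS]
  | cons w ws ih =>
      intro P0 acc
      simp only [List.foldl_cons]
      rw [ih]
      rw [pvPS, List.tail_cons, pvPS_cons_head (acc + ((w.length : Int) + 1)) ws]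
      simp

theorem pvPS_getD (ws : List (List Char)) :
    ∀ (acc : Int) (k : Nat), k ≤ ws.length →
      (pvPS acc ws).getD k 0 = acc + pvCost (ws.take k) := by
  induction ws with
  | nil =>
      intro acc k hk
      have hk0 : k = 0 := by simpa using hk
      subst hk0
      simp [pvPS, pvCost]
  | cons w ws ih =>
      intro acc k hk
      cases k with
      | zero => simp [pvPS, pvCost]
      | succ k =>
          simp only [pvPS, List.getD_cons_succ, List.take_succ_cons]
          rw [ih _ k (by simpa using hk)]
          simp [pvCost]
          ring

theorem pvCost_append (xs ys : List (List Char)) : pvCost (xs ++ ys) = pvCost xs + pvCost ys := by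
  simp [pvCost]

theorem pvCost_ge_length (ws : List (List Char)) : (ws.length : Int) ≤ pvCost ws := by
  induction ws with
  | nil => simp [pvCost]
  | cons w ws ih =>
      simp only [pvCost, List.map_cons, List.sum_cons, List.length_cons] at *
      push_cast
      have : (0:Int) ≤ (w.length : Int) := Int.natCast_nonneg _
      omega

-- cost of an initial segment grows by at least one per word
theorem pvCost_take_lt (ws : List (List Char)) (a b : Nat) (hab : a ≤ b) (hb : b ≤ ws.length) :
    pvCost (ws.take a) + ((b : Int) - (a : Int)) ≤ pvCost (ws.take b) := by
  have hsplit : ws.take b = ws.take a ++ ((ws.drop a).take (b - a)) := by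
    conv_lhs => rw [show b = a + (b - a) by omega]
    rw [List.take_add]
  rw [hsplit, pvCost_append]
  have hlen : ((ws.drop a).take (b - a)).length = b - a := by
    simp [List.length_take, List.length_drop]
    omega
  have := pvCost_ge_length ((ws.drop a).take (b - a))
  rw [hlen] at this
  omega

theorem pvCost_take_mono (ws : List (List Char)) (a b : Nat) (hab : a ≤ b) (hb : b ≤ ws.length) :
    pvCost (ws.take a) ≤ pvCost (ws.take b) := by
  have := pvCost_take_lt ws a b hab hb
  push_cast at this
  omega

theorem pvCost_take_succ (ws : List (List Char)) (m : Nat) (hm : m < ws.length) :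
    pvCost (ws.take (m + 1)) = pvCost (ws.take m) + ((ws[m].length : Int) + 1) := by
  have h : ws.take (m + 1) = ws.take m ++ [ws[m]] := by
    rw [List.take_add_one, List.getElem?_eq_getElem hm]
    simp
  rw [h, pvCost_append]
  simp [pvCost]

-- ---- B's binary search finds the greedy chunk end ----

theorem pvBsearch_spec (P : List Int) (N t : Int) (F : Nat → Int)
    (hP : ∀ x : Int, 0 ≤ x → x ≤ N → PySem.List.pyGetD P x 0 = F x.toNat)
    (mono : ∀ a b : Nat, a ≤ b → (b : Int) ≤ N → F a ≤ F b) :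
    ∀ (fuel : Nat) (lo hi : Int), (hi - lo).toNat ≤ fuel → 0 ≤ lo → lo ≤ hi → hi ≤ N →
      F lo.toNat ≤ t → (∀ k : Int, hi < k → k ≤ N → t < F k.toNat) →
      lo ≤ pvBsearch P t fuel lo hi ∧ pvBsearch P t fuel lo hi ≤ hi ∧
        F (pvBsearch P t fuel lo hi).toNat ≤ t ∧
        (∀ k : Int, pvBsearch P t fuel lo hi < k → k ≤ N → t < F k.toNat) := by
  intro fuel
  induction fuel with
  | zero =>
      intro lo hi hfuel h0 hlohi hhiN hlo hhi
      simp only [pvBsearch]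
      exact ⟨le_refl _, hlohi, hlo, fun k hk hkN => hhi k (by omega) hkN⟩
  | succ fuel ihf =>
      intro lo hi hfuel h0 hlohi hhiN hlo hhi
      by_cases h : lo < hi
      · rw [pvBsearch, if_pos h]
        have hmid : PySem.Int.floordiv (lo + hi + 1) 2 = (lo + hi + 1) / 2 :=
          PySem.Int.floordiv_eq_ediv_of_pos (by omega)
        have h1 : lo < PySem.Int.floordiv (lo + hi + 1) 2 := by omega
        have h2 : PySem.Int.floordiv (lo + hi + 1) 2 ≤ hi := by omega
        by_cases hc : PySem.List.pyGetD P (PySem.Int.floordiv (lo + hi + 1) 2) 0 ≤ t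
        · simp only [if_pos hc]
          rw [hP _ (by omega) (by omega)] at hc
          have := ihf (PySem.Int.floordiv (lo + hi + 1) 2) hi (by omega) (by omega) h2 hhiN hc hhi
          exact ⟨by omega, this.2.1, this.2.2.1, this.2.2.2⟩
        · simp only [if_neg hc]
          rw [hP _ (by omega) (by omega)] at hc
          push Not at hc
          have hhi' : ∀ k : Int, PySem.Int.floordiv (lo + hi + 1) 2 - 1 < k → k ≤ N → t < F k.toNat := by
            intro k hk hkN
            by_cases hkh : hi < k
            · exact hhi k hkh hkN
            · exact lt_of_lt_of_le hc (mono _ _ (by omega) (by omega))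
          have := ihf lo (PySem.Int.floordiv (lo + hi + 1) 2 - 1) (by omega) h0 (by omega)
            (by omega) hlo hhi'
          exact ⟨this.1, by omega, this.2.2.1, this.2.2.2⟩
      · rw [pvBsearch, if_neg h]
        exact ⟨le_refl _, hlohi, hlo, fun k hk hkN => hhi k (by omega) hkN⟩


-- ---- the reference inner loop, indexed: it stops exactly at the greedy end g ----

theorem pvRefInner_eq (words : List (List Char)) (maxc : Int) :
    ∀ (fuel : Nat) (i m : Nat), words.length - m ≤ fuel → i < m → m ≤ words.length →
      pvCost (words.take m) - pvCost (words.take i) ≤ maxc →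
      ∃ g : Nat, m ≤ g ∧ g ≤ words.length ∧
        pvCost (words.take g) - pvCost (words.take i) ≤ maxc ∧
        (g = words.length ∨ maxc < pvCost (words.take (g + 1)) - pvCost (words.take i)) ∧
        pvRefInner maxc (words.drop m) ((words.drop i).take (m - i)) (pvCost (words.take m) - pvCost (words.take i))
          = ((words.drop i).take (g - i), words.drop g) := by
  intro fuel
  induction fuel with
  | zero =>
      intro i m hfuel him hm hcost
      have hmn : m = words.length := by omega
      refine ⟨m, le_refl _, hm, hcost, Or.inl hmn, ?_⟩
      rw [hmn, List.drop_length]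
      simp [pvRefInner]
  | succ fuel ihf =>
      intro i m hfuel him hm hcost
      by_cases hmn : m = words.length
      · refine ⟨m, le_refl _, hm, hcost, Or.inl hmn, ?_⟩
        rw [hmn, List.drop_length]
        simp [pvRefInner]
      · have hmlt : m < words.length := by omega
        have hdrop : words.drop m = words[m] :: words.drop (m + 1) := List.drop_eq_getElem_cons hmlt
        have hsucc := pvCost_take_succ words m hmlt
        by_cases hfit : pvCost (words.take (m + 1)) - pvCost (words.take i) ≤ maxc
        · -- the word fits: the inner loop consumes it
          have hmono : pvCost (words.take i) ≤ pvCost (words.take m) :=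
            pvCost_take_mono words i m (by omega) hm
          have hcond : ((words[m].length : Int) + 1 ≤ maxc ∧
              (pvCost (words.take m) - pvCost (words.take i)) + ((words[m].length : Int) + 1) ≤ maxc) := by
            constructor
            · omega
            · omega
          rw [hdrop]
          rw [pvRefInner, if_pos hcond]
          have hchunk : (words.drop i).take (m - i) ++ [words[m]] = (words.drop i).take (m + 1 - i) := by
            have hidx : (words.drop i)[m - i]? = some words[m] := by
              rw [List.getElem?_drop]
              rw [List.getElem?_eq_getElem (by omega)]
              congr 1
              congr 1
              omega
            have := List.take_add_one (l := words.drop i) (i := m - i)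
            rw [hidx] at this
            have e : m + 1 - i = (m - i) + 1 := by omega
            rw [e, this]
            simp
          rw [hchunk]
          have e2 : pvCost (words.take m) - pvCost (words.take i) + ((words[m].length : Int) + 1)
              = pvCost (words.take (m + 1)) - pvCost (words.take i) := by omega
          rw [e2]
          obtain ⟨g, hg1, hg2, hg3, hg4, hg5⟩ := ihf i (m + 1) (by omega) (by omega) (by omega) hfit
          exact ⟨g, by omega, hg2, hg3, hg4, hg5⟩
        · -- the word does not fit: stop here, g = m
          have hcond : ¬ ((words[m].length : Int) + 1 ≤ maxc ∧
              (pvCost (words.take m) - pvCost (words.take i)) + ((words[m].length : Int) + 1) ≤ maxc) := by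
            intro hcond
            omega
          refine ⟨m, le_refl _, hm, hcost, Or.inr (by omega), ?_⟩
          rw [hdrop, pvRefInner, if_neg hcond, ← hdrop]

-- ---- B's outer loop equals the reference greedy (chunker equality assumed from Pre_) ----

theorem pvOuter_eq (words : List (List Char)) (maxc ov : Int)
    (hcc : ∀ w ∈ words, pvAChunkByChar w maxc ov = pvBChunkByChar w maxc ov) :
    ∀ (fuel : Nat) (i : Nat), words.length - i ≤ fuel → i ≤ words.length →
      pvBOuterGo words (pvPS 0 words) maxc ov fuel i = pvRefOuter maxc ov (words.drop i) := by
  have hP : ∀ x : Int, 0 ≤ x → x ≤ (words.length : Int) →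
      PySem.List.pyGetD (pvPS 0 words) x 0 = pvCost (words.take x.toNat) := by
    intro x hx0 hxN
    have hx : x = ((x.toNat : Nat) : Int) := by omega
    conv_lhs => rw [hx]
    rw [PySem.List.pyGetD_natCast, pvPS_getD words 0 x.toNat (by omega)]
    simp
  have mono : ∀ a b : Nat, a ≤ b → (b : Int) ≤ (words.length : Int) →
      pvCost (words.take a) ≤ pvCost (words.take b) := by
    intro a b hab hbN
    exact pvCost_take_mono words a b hab (by exact_mod_cast hbN)
  intro fuel
  induction fuel with
  | zero =>
      intro i hfuel hi
      have : i = words.length := by omega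
      rw [pvBOuterGo, this, List.drop_length, pvRefOuter]
  | succ fuel ihf =>
      intro i hfuel hi
      by_cases hin : i < words.length
      · have hdrop : words.drop i = words[i] :: words.drop (i + 1) := List.drop_eq_getElem_cons hin
        rw [pvBOuterGo, dif_pos hin]
        by_cases hbig : ((words[i]).length : Int) + 1 > maxc
        · rw [if_pos hbig, hdrop, pvRefOuter, if_pos hbig]
          rw [← hcc words[i] (List.getElem_mem hin), ihf (i + 1) (by omega) (by omega)]
        · rw [if_neg hbig]
          have hsucc := pvCost_take_succ words i hin
          -- the binary search result
          have hbs := pvBsearch_spec (pvPS 0 words) (words.length : Int)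
            (PySem.List.pyGetD (pvPS 0 words) (i : Int) 0 + maxc)
            (fun k => pvCost (words.take k)) hP mono
            ((words.length : Int) - ((i : Int) + 1)).toNat ((i : Int) + 1) (words.length : Int)
            (by omega) (by omega) (by exact_mod_cast hin) (le_refl _)
            (by
              rw [hP (i : Int) (by omega) (by omega)]
              simp only [Int.toNat_natCast]
              have e : ((i : Int) + 1).toNat = i + 1 := by omega
              rw [e]
              omega)
            (by intro k hk hkN; omega)
          set j := pvBsearch (pvPS 0 words)
            (PySem.List.pyGetD (pvPS 0 words) (i : Int) 0 + maxc)
            ((words.length : Int) - ((i : Int) + 1)).toNat ((i : Int) + 1) (words.length : Int) with hjdef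
          obtain ⟨hj1, hj2, hj3, hj4⟩ := hbs
          rw [hP (i : Int) (by omega) (by omega)] at hj3 hj4
          simp only [Int.toNat_natCast] at hj3 hj4
          -- the reference inner loop result
          obtain ⟨g, hg1, hg2, hg3, hg4, hg5⟩ := pvRefInner_eq words maxc (words.length - (i + 1))
            i (i + 1) (by omega) (by omega) (by omega) (by omega)
          -- j = g
          have hjg : j = (g : Int) := by
            rcases lt_trichotomy j (g : Int) with hlt | heq | hgt
            · exfalso
              have := hj4 (g : Int) hlt (by exact_mod_cast hg2)
              simp only [Int.toNat_natCast] at this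
              omega
            · exact heq
            · exfalso
              have hgn : g ≠ words.length := by
                intro hgn
                rw [hgn] at hgt
                exact absurd hj2 (not_le.mpr (by exact_mod_cast hgt))
              have hg4' := hg4.resolve_left hgn
              have hmono2 : pvCost (words.take (g + 1)) ≤ pvCost (words.take j.toNat) := by
                apply mono (g + 1) j.toNat (by omega) (by omega)
              omega
          -- assemble
          rw [hdrop, pvRefOuter, if_neg hbig]
          simp only
          have hchunk1 : [words[i]] = (words.drop i).take ((i + 1) - i) := by
            have e : (i + 1) - i = 1 := by omega
            rw [e, hdrop]
            rfl
          -- the reference's inner chunk: started from [words[i]] with clen = cost of words[i]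
          have hstart : pvRefInner maxc (words.drop (i + 1)) [words[i]] (((words[i]).length : Int) + 1)
              = ((words.drop i).take (g - i), words.drop g) := by
            have e1 : ((words[i]).length : Int) + 1
                = pvCost (words.take (i + 1)) - pvCost (words.take i) := by omega
            rw [hchunk1, e1]
            exact hg5
          rw [hstart]
          have hslice : PySem.List.slice words (some (i : Int)) (some j)
              = (words.drop i).take (g - i) := by
            rw [hjg, PySem.List.slice_natCast]
          have hrec : pvBOuterGo words (pvPS 0 words) maxc ov fuel j.toNat
              = pvRefOuter maxc ov (words.drop g) := by
            rw [hjg]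
            simp only [Int.toNat_natCast]
            exact ihf g (by omega) (by omega)
          rw [hslice, hrec]
      · rw [pvBOuterGo, dif_neg hin]
        have : i = words.length := by omega
        rw [this, List.drop_length, pvRefOuter]

-- ===== VERDICT (by name: the statement is the Claim_ definition above) =====
theorem chunk_by_word_py_spec : Claim_equal_chunk_by_word_py := by
  intro text max_chars overlap _ hpre
  unfold Spec_chunk_by_word_py chunk_by_word_py chunk_by_word_py_alt
  have hcc : ∀ w ∈ PySem.Chars.split₀ text.toList,
      pvAChunkByChar w max_chars overlap = pvBChunkByChar w max_chars overlap := by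
    intro w hwmem
    apply pvChunkByChar_eq
    rcases hpre with h | h
    · exact Or.inl (h w hwmem)
    · exact Or.inr h
  have hA := (pvMainRef max_chars overlap (PySem.Chars.split₀ text.toList).length
    (PySem.Chars.split₀ text.toList) le_rfl).1 []
  simp only [List.nil_append] at hA
  have hP : (List.foldl
      (fun (st : List Int × Int) w =>
        (st.1 ++ [st.2 + ((w.length : Int) + 1)], st.2 + ((w.length : Int) + 1)))
      ([0], 0) (PySem.Chars.split₀ text.toList)).1 = pvPS 0 (PySem.Chars.split₀ text.toList) := by
    rw [pvFoldP]
    rw [pvPS_cons_head 0 (PySem.Chars.split₀ text.toList)]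
    simp
  have hB := pvOuter_eq (PySem.Chars.split₀ text.toList) max_chars overlap hcc
    (PySem.Chars.split₀ text.toList).length 0 (by omega) (by omega)
  simp only [List.drop_zero] at hB
  simp only [hP, hB]
  exact hA
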